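-- pv_equiv track=rewrite | github.com/MaiPriyanshuHoooon/triageX | core/parsers.py | parse_wmic_useraccount_table
-- ===== SOURCE A (Python) =====
-- def escape_html(text):
--     """Escape special HTML characters"""
--     if not text:
--         return ""
--     return (str(text)
--             .replace("&", "&amp;")
--             .replace("<", "&lt;")
--             .replace(">", "&gt;")
--             .replace('"', "&quot;")
--             .replace("'", "&#x27;"))
--
-- def parse_wmic_useraccount_table(lines):
--     """Parse wmic useraccount list output into table"""
--     html = '<table class="data-table">\n'
--
--     # Find header line (first non-empty line)
--     header_line = None
--     header_idx = 0
--     for i, line in enumerate(lines):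
--         if line.strip():
--             header_line = line
--             header_idx = i
--             break
--
--     if not header_line:
--         return f'<pre>{escape_html(chr(10).join(lines))}</pre>'
--
--     # Parse headers by splitting on multiple spaces
--     headers = []
--     current_header = ""
--     prev_was_space = False
--
--     for char in header_line:
--         if char == ' ':
--             if prev_was_space and current_header.strip():
--                 headers.append(current_header.strip())
--                 current_header = ""
--             elif not prev_was_space:
--                 current_header += char
--             prev_was_space = True
--         else:
--             current_header += char
--             prev_was_space = False
--
--     if current_header.strip():
--         headers.append(current_header.strip())
--
--     # If we couldn't parse headers, use generic headers
--     if not headers or len(headers) < 3: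
--         headers = ['AccountType', 'Description', 'Disabled', 'Domain', 'FullName', 'LocalAccount', 'Lockout', 'Name', 'PasswordChangeable', 'PasswordExpires', 'PasswordRequired', 'SID', 'SIDType', 'Status']
--
--     html += '  <thead>\n    <tr>'
--     for h in headers[:10]:  # Limit to first 10 columns for readability
--         html += f'<th>{escape_html(h)}</th>'
--     html += '</tr>\n  </thead>\n'
--     html += '  <tbody>\n'
--
--     # Parse data rows (skip first 2 lines - header and blank)
--     for line in lines[header_idx+2:]:
--         if line.strip():
--             # Split by multiple spaces
--             parts = [p.strip() for p in line.split('  ') if p.strip()]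
--             if parts and len(parts) >= 3:
--                 html += '    <tr>'
--                 for part in parts[:10]:  # Limit to first 10 columns
--                     html += f'<td>{escape_html(part)}</td>'
--                 html += '</tr>\n'
--
--     html += '  </tbody>\n</table>'
--     return html
-- ===== SOURCE B (Python) =====
-- DEFAULT_HEADERS = ['AccountType', 'Description', 'Disabled', 'Domain', 'FullName', 'LocalAccount', 'Lockout', 'Name', 'PasswordChangeable', 'PasswordExpires', 'PasswordRequired', 'SID', 'SIDType', 'Status']
--
--
-- def escape_html(text):
--     """Escape special HTML characters"""
--     if not text:
--         return ""
--     return (str(text)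
--             .replace("&", "&amp;")
--             .replace("<", "&lt;")
--             .replace(">", "&gt;")
--             .replace('"', "&quot;")
--             .replace("'", "&#x27;"))
--
--
-- def _cols(line):
--     """Split a wmic table line into stripped, non-empty columns.
--
--     Columns are separated by runs of two or more spaces; this one splitter
--     serves both the header line and the data rows (the char-by-char header
--     state machine of the original is equivalent to it)."""
--     return [p.strip() for p in line.split('  ') if p.strip()]
--
--
-- def parse_wmic_useraccount_table(lines):
--     """Parse wmic useraccount list output into table"""
--     found = next(((i, line) for i, line in enumerate(lines) if line.strip()), None)
--     if found is None:
--         return '<pre>%s</pre>' % escape_html('\n'.join(lines))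
--     idx, header_line = found
--
--     headers = _cols(header_line)
--     if len(headers) < 3:
--         headers = DEFAULT_HEADERS
--
--     head = ''.join('<th>%s</th>' % escape_html(h) for h in headers[:10])
--     body = ''.join(
--         '    <tr>%s</tr>\n' % ''.join('<td>%s</td>' % escape_html(p) for p in parts[:10])
--         for parts in map(_cols, lines[idx + 2:])
--         if len(parts) >= 3
--     )
--     return ('<table class="data-table">\n  <thead>\n    <tr>' + head +
--             '</tr>\n  </thead>\n  <tbody>\n' + body + '  </tbody>\n</table>')
-- ===== Notes on version B (the rewrite author's own statement) =====
-- stated objective: simpler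
-- what changed: The char-by-char header state machine (current_header/prev_was_space flags plus final flush) is replaced by the same split-on-two-spaces column splitter the data rows already use, shared as one helper, and the HTML is assembled by joining comprehensions instead of repeated string-concatenation loops.
import Mathlib
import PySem

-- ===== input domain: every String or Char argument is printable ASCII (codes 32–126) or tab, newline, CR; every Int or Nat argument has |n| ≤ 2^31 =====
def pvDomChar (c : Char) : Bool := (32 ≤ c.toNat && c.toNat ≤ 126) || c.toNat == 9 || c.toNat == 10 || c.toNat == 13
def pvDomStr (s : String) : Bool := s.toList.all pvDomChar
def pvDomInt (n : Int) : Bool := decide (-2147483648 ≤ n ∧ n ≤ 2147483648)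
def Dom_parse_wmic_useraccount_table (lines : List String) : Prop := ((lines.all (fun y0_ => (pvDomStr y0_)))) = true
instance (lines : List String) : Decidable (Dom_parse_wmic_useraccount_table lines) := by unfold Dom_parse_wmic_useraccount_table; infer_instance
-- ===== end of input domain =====

-- B replaces A's char-by-char header state machine with the split-on-two-spaces
-- column splitter A already uses for data rows, and assembles the HTML by joining
-- mapped lists instead of string-concatenation loops (objective: simpler).

-- ===== PORT A =====
-- shared helper: escape_html (identical Python in both files); works on List Char, exact on the ASCII domain
def escHtml (text : List Char) : List Char :=
  if text = [] then []
  else PySem.Chars.replace (PySem.Chars.replace (PySem.Chars.replace (PySem.Chars.replace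
    (PySem.Chars.replace text ['&'] ("&amp;".toList)) ['<'] ("&lt;".toList)) ['>'] ("&gt;".toList))
    ['"'] ("&quot;".toList)) ['\''] ("&#x27;".toList)

-- shared constant: the generic header fallback list
def defaultHeaders : List (List Char) :=
  ["AccountType".toList, "Description".toList, "Disabled".toList, "Domain".toList,
   "FullName".toList, "LocalAccount".toList, "Lockout".toList, "Name".toList,
   "PasswordChangeable".toList, "PasswordExpires".toList, "PasswordRequired".toList,
   "SID".toList, "SIDType".toList, "Status".toList]

-- shared helper: [p.strip() for p in line.split('  ') if p.strip()]
-- (A has this comprehension inline for data rows; B's _cols is the same comprehension)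
def colsOf (line : List Char) : List (List Char) :=
  ((PySem.Chars.splitOn line ("  ".toList)).filter (fun p => PySem.Chars.strip p ≠ [])).map PySem.Chars.strip

-- A: the find-header loop with break
def findHeaderA : List (List Char) → Nat → Option (List Char × Nat)
  | [], _ => none
  | l :: rest, i => if PySem.Chars.strip l ≠ [] then some (l, i) else findHeaderA rest (i + 1)

-- A: one step of the header state machine (state: headers, current_header, prev_was_space)
def stepA (st : List (List Char) × List Char × Bool) (c : Char) : List (List Char) × List Char × Bool :=
  if c = ' ' then
    if st.2.2 = true ∧ PySem.Chars.strip st.2.1 ≠ [] then (st.1 ++ [PySem.Chars.strip st.2.1], [], true)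
    else if st.2.2 = false then (st.1, st.2.1 ++ [' '], true)
    else (st.1, st.2.1, true)
  else (st.1, st.2.1 ++ [c], false)

-- A: the whole header state machine plus the final flush
def headersA (l : List Char) : List (List Char) :=
  let st := l.foldl stepA ([], [], false)
  if PySem.Chars.strip st.2.1 ≠ [] then st.1 ++ [PySem.Chars.strip st.2.1] else st.1

def parse_wmic_useraccount_table (lines : List String) : String :=
  let ls := lines.map String.toList
  match findHeaderA ls 0 with
  | none => String.ofList ("<pre>".toList ++ escHtml (PySem.Chars.join ['\n'] ls) ++ "</pre>".toList)
  | some (headerLine, headerIdx) =>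
    let html := "<table class=\"data-table\">\n".toList
    let headers := headersA headerLine
    let headers := if headers = [] ∨ headers.length < 3 then defaultHeaders else headers
    let html := html ++ "  <thead>\n    <tr>".toList
    let html := (PySem.List.slice headers none (some 10)).foldl
      (fun acc h => acc ++ "<th>".toList ++ escHtml h ++ "</th>".toList) html
    let html := html ++ "</tr>\n  </thead>\n".toList
    let html := html ++ "  <tbody>\n".toList
    let html := (PySem.List.slice ls (some ((headerIdx : Int) + 2)) none).foldl (fun acc line =>
        if PySem.Chars.strip line ≠ [] then
          let parts := colsOf line
          if parts ≠ [] ∧ 3 ≤ parts.length then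
            let acc := acc ++ "    <tr>".toList
            let acc := (PySem.List.slice parts none (some 10)).foldl
              (fun a p => a ++ "<td>".toList ++ escHtml p ++ "</td>".toList) acc
            acc ++ "</tr>\n".toList
          else acc
        else acc) html
    String.ofList (html ++ "  </tbody>\n</table>".toList)

-- ===== PORT B =====
-- B: next(((i, line) for i, line in enumerate(lines) if line.strip()), None)
def findFirstB : List (List Char) → Nat → Option (Nat × List Char)
  | [], _ => none
  | l :: rest, i => if PySem.Chars.strip l ≠ [] then some (i, l) else findFirstB rest (i + 1)

def parse_wmic_useraccount_table_alt (lines : List String) : String :=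
  let ls := lines.map String.toList
  match findFirstB ls 0 with
  | none => String.ofList ("<pre>".toList ++ escHtml (PySem.Chars.join ['\n'] ls) ++ "</pre>".toList)
  | some (idx, headerLine) =>
    let headers0 := colsOf headerLine
    let headers := if headers0.length < 3 then defaultHeaders else headers0
    let head := PySem.Chars.join []
      ((PySem.List.slice headers none (some 10)).map (fun h => "<th>".toList ++ escHtml h ++ "</th>".toList))
    let body := PySem.Chars.join []
      ((((PySem.List.slice ls (some ((idx : Int) + 2)) none).map colsOf).filter
          (fun parts => 3 ≤ parts.length)).map (fun parts =>
        "    <tr>".toList ++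
          PySem.Chars.join [] ((PySem.List.slice parts none (some 10)).map
            (fun p => "<td>".toList ++ escHtml p ++ "</td>".toList)) ++ "</tr>\n".toList))
    String.ofList ("<table class=\"data-table\">\n  <thead>\n    <tr>".toList ++ head ++
      "</tr>\n  </thead>\n  <tbody>\n".toList ++ body ++ "  </tbody>\n</table>".toList)

-- ===== PRECONDITION & SPEC =====
def Spec_parse_wmic_useraccount_table (lines : List String) (out : String) : Prop := out = parse_wmic_useraccount_table_alt lines
instance (lines : List String) (out : String) : Decidable (Spec_parse_wmic_useraccount_table lines out) := by unfold Spec_parse_wmic_useraccount_table; infer_instance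

-- ===== CLAIM (what is proved, stated in full; the proofs are below) =====
def Claim_equal_parse_wmic_useraccount_table : Prop := ∀ (lines : List String), Dom_parse_wmic_useraccount_table lines → Spec_parse_wmic_useraccount_table lines (parse_wmic_useraccount_table lines)

-- ===== LEMMAS AND PROOFS =====

-- whitespace facts
theorem rstrip_eq_nil_iff (l : List Char) : PySem.Chars.rstrip l = [] ↔ ∀ c ∈ l, PySem.Chars.isspace c := by
  simp [PySem.Chars.rstrip, List.dropWhile_eq_nil_iff]

theorem strip_eq_nil_iff (l : List Char) : PySem.Chars.strip l = [] ↔ ∀ c ∈ l, PySem.Chars.isspace c := by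
  constructor
  · intro h c hc
    rw [PySem.Chars.strip] at h
    rw [rstrip_eq_nil_iff] at h
    by_cases hw : PySem.Chars.isspace c
    · exact hw
    · -- c survives lstrip
      have : c ∈ PySem.Chars.lstrip l := by
        rw [PySem.Chars.lstrip]
        have := List.takeWhile_append_dropWhile (p := PySem.Chars.isspace) (l := l)
        rw [← this] at hc
        rcases List.mem_append.mp hc with h1 | h2
        · exact absurd (List.mem_takeWhile_imp h1) hw
        · exact h2
      exact h c this
  · intro h
    rw [PySem.Chars.strip, rstrip_eq_nil_iff]
    intro c hc
    exact h c (List.dropWhile_sublist _ |>.mem hc)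

theorem strip_append_ws (l : List Char) (c : Char) (hc : PySem.Chars.isspace c) :
    PySem.Chars.strip (l ++ [c]) = PySem.Chars.strip l := by
  simp [PySem.Chars.strip, PySem.Chars.rstrip, PySem.Chars.lstrip, List.dropWhile_append]
  split
  · rename_i h
    simp [List.dropWhile, hc]
    intro x hx
    exact h x ((List.dropWhile_sublist _).mem hx)
  · rename_i h
    simp [List.dropWhile, hc]

theorem lstrip_append (l m : List Char) (h : PySem.Chars.lstrip l ≠ []) :
    PySem.Chars.lstrip (l ++ m) = PySem.Chars.lstrip l ++ m := by
  simp [PySem.Chars.lstrip, List.dropWhile_append]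
  intro hh
  exact absurd hh (by simpa [PySem.Chars.lstrip] using h)

theorem strip_eq_of_lstrip_eq (a b : List Char) (h : PySem.Chars.lstrip a = PySem.Chars.lstrip b) :
    PySem.Chars.strip a = PySem.Chars.strip b := by
  simp [PySem.Chars.strip, h]

theorem lstrip_ne_nil_of_strip (l : List Char) (h : PySem.Chars.strip l ≠ []) :
    PySem.Chars.lstrip l ≠ [] := by
  intro hl
  exact h (by simp [PySem.Chars.strip, hl, PySem.Chars.rstrip])

theorem lstrip_append_of_ws (l m : List Char) (h : ∀ c ∈ l, PySem.Chars.isspace c) :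
    PySem.Chars.lstrip (l ++ m) = PySem.Chars.lstrip m := by
  simp [PySem.Chars.lstrip, List.dropWhile_append, List.dropWhile_eq_nil_iff.mpr h]

def tk : List Char → List Char → List (List Char)
  | [], ch => [ch]
  | [c], ch => [ch ++ [c]]
  | c1 :: c2 :: r, ch =>
    if c1 = ' ' ∧ c2 = ' ' then ch :: tk r []
    else tk (c2 :: r) (ch ++ [c1])
termination_by cs _ => cs.length

def mtok : List Char → List Char → Bool → List (List Char)
  | [], cur, _ => if PySem.Chars.strip cur ≠ [] then [PySem.Chars.strip cur] else []
  | c :: r, cur, prev =>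
    if c = ' ' then
      if prev = true ∧ PySem.Chars.strip cur ≠ [] then PySem.Chars.strip cur :: mtok r [] true
      else if prev = false then mtok r (cur ++ [' ']) true
      else mtok r cur true
    else mtok r (cur ++ [c]) false

def fsTok (l : List (List Char)) : List (List Char) :=
  (l.map PySem.Chars.strip).filter (fun p => p ≠ [])

theorem fsTok_nil : fsTok [] = [] := rfl

theorem fsTok_cons (x : List Char) (l : List (List Char)) :
    fsTok (x :: l) = if PySem.Chars.strip x = [] then fsTok l else PySem.Chars.strip x :: fsTok l := by
  by_cases h : PySem.Chars.strip x = [] <;> simp [fsTok, h]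

theorem tk_nil (ch : List Char) : tk [] ch = [ch] := by rw [tk]

theorem tk_space_space (r ch : List Char) : tk (' ' :: ' ' :: r) ch = ch :: tk r [] := by
  rw [tk]; simp

theorem tk_cons_ne (c : Char) (r ch : List Char) (h : c ≠ ' ') : tk (c :: r) ch = tk r (ch ++ [c]) := by
  match r with
  | [] => simp [tk]
  | c2 :: r2 => rw [tk]; simp [h]

theorem tk_space_ne (c : Char) (r ch : List Char) (h : c ≠ ' ') :
    tk (' ' :: c :: r) ch = tk (c :: r) (ch ++ [' ']) := by
  rw [tk]; simp [h]

theorem strip_append_ne (l : List Char) (c : Char) (h : PySem.Chars.strip l ≠ []) :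
    PySem.Chars.strip (l ++ [c]) ≠ [] := by
  by_cases hc : PySem.Chars.isspace c
  · rw [strip_append_ws l c hc]; exact h
  · intro hh
    rw [strip_eq_nil_iff] at hh
    exact hc (hh c (by simp))

theorem strip_nonws_ne (l : List Char) (c : Char) (h : ¬ PySem.Chars.isspace c) :
    PySem.Chars.strip (l ++ [c]) ≠ [] := by
  intro hh
  rw [strip_eq_nil_iff] at hh
  exact h (hh c (by simp))

theorem lstrip_ws_append (l : List Char) (c : Char) (hl : PySem.Chars.strip l = [])
    (h : ¬ PySem.Chars.isspace c) : PySem.Chars.lstrip (l ++ [c]) = [c] := by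
  rw [lstrip_append_of_ws l [c] ((strip_eq_nil_iff l).mp hl)]
  simp [PySem.Chars.lstrip, List.dropWhile, h]

theorem sim_nil :
    ((∀ cur ch prev, PySem.Chars.strip cur = [] → PySem.Chars.strip ch = [] →
        mtok [] cur prev = fsTok (tk [] ch)) ∧
     (∀ cur ch, PySem.Chars.strip cur = [] → PySem.Chars.strip ch = [] →
        mtok [] cur true = fsTok (tk (' ' :: []) ch)) ∧
     (∀ cur ch, PySem.Chars.strip cur ≠ [] → PySem.Chars.lstrip cur = PySem.Chars.lstrip ch →
        mtok [] cur false = fsTok (tk [] ch)) ∧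
     (∀ w ch, PySem.Chars.strip w ≠ [] → PySem.Chars.lstrip w = PySem.Chars.lstrip ch →
        mtok [] (w ++ [' ']) true = fsTok (tk (' ' :: []) ch))) := by
  refine ⟨?_, ?_, ?_, ?_⟩
  · intro cur ch prev hcur hch
    rw [mtok, tk_nil, fsTok_cons]
    simp [hcur, hch, fsTok_nil]
  · intro cur ch hcur hch
    rw [mtok, show tk [' '] ch = [ch ++ [' ']] from by rw [tk], fsTok_cons]
    simp [hcur, strip_append_ws ch ' ' (by decide), hch, fsTok_nil]
  · intro cur ch hcur hls
    rw [mtok, tk_nil, fsTok_cons]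
    have := strip_eq_of_lstrip_eq cur ch hls
    simp [hcur, ← this, fsTok_nil]
  · intro w ch hw hls
    rw [mtok, show tk [' '] ch = [ch ++ [' ']] from by rw [tk], fsTok_cons]
    have h1 : PySem.Chars.strip (w ++ [' ']) = PySem.Chars.strip w := strip_append_ws w ' ' (by decide)
    have h2 : PySem.Chars.strip (ch ++ [' ']) = PySem.Chars.strip ch := strip_append_ws ch ' ' (by decide)
    have h3 := strip_eq_of_lstrip_eq w ch hls
    simp [h1, h2, ← h3, hw, fsTok_nil]

theorem main_sim : ∀ (n : Nat) (cs : List Char), cs.length ≤ n →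
    ((∀ cur ch prev, PySem.Chars.strip cur = [] → PySem.Chars.strip ch = [] →
        mtok cs cur prev = fsTok (tk cs ch)) ∧
     (∀ cur ch, PySem.Chars.strip cur = [] → PySem.Chars.strip ch = [] →
        mtok cs cur true = fsTok (tk (' ' :: cs) ch)) ∧
     (∀ cur ch, PySem.Chars.strip cur ≠ [] → PySem.Chars.lstrip cur = PySem.Chars.lstrip ch →
        mtok cs cur false = fsTok (tk cs ch)) ∧
     (∀ w ch, PySem.Chars.strip w ≠ [] → PySem.Chars.lstrip w = PySem.Chars.lstrip ch →
        mtok cs (w ++ [' ']) true = fsTok (tk (' ' :: cs) ch))) := by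
  intro n
  induction n with
  | zero =>
    intro cs h
    have : cs = [] := by cases cs <;> simp_all
    subst this
    exact sim_nil
  | succ n ih =>
    intro cs hlen
    match cs with
    | [] => exact sim_nil
    | c :: r =>
      have hr : r.length ≤ n := by simp at hlen; omega
      refine ⟨?_, ?_, ?_, ?_⟩
      -- (W)
      · intro cur ch prev hcur hch
        by_cases hc : c = ' '
        · subst hc
          rw [mtok]
          simp only [if_pos rfl, hcur, ne_eq, not_true_eq_false, and_false, if_false]
          have hstep : (if prev = false then mtok r (cur ++ [' ']) true else mtok r cur true) =
              mtok r (if prev = false then cur ++ [' '] else cur) true := by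
            by_cases hp : prev = false <;> simp [hp]
          rw [hstep]
          have hcur' : PySem.Chars.strip (if prev = false then cur ++ [' '] else cur) = [] := by
            by_cases hp : prev = false <;> simp [hp, strip_append_ws cur ' ' (by decide), hcur]
          match r with
          | [] =>
            rw [mtok, show tk [' '] ch = [ch ++ [' ']] from by rw [tk], fsTok_cons]
            simp [hcur', strip_append_ws ch ' ' (by decide), hch, fsTok_nil]
          | ' ' :: r2 =>
            rw [tk_space_space, fsTok_cons]
            have hr2 : r2.length ≤ n := by simp at hr ⊢; omega
            rw [mtok]
            simp only [if_pos rfl, hcur', ne_eq, not_true_eq_false, and_false, if_false,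
              if_neg (by simp : ¬ (true = false))]
            rw [(ih r2 hr2).1 _ [] true hcur' rfl]
            simp [hch]
          | c2 :: r2 =>
            by_cases hc2 : c2 = ' '
            · subst hc2
              rw [tk_space_space, fsTok_cons]
              have hr2 : r2.length ≤ n := by simp at hr ⊢; omega
              rw [mtok]
              simp only [if_pos rfl, hcur', ne_eq, not_true_eq_false, and_false, if_false,
                if_neg (by simp : ¬ (true = false))]
              rw [(ih r2 hr2).1 _ [] true hcur' rfl]
              simp [hch]
            · rw [tk_space_ne c2 r2 ch hc2]
              exact (ih (c2 :: r2) hr).1 _ (ch ++ [' ']) true hcur'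
                (by rw [strip_append_ws ch ' ' (by decide)]; exact hch)
        · rw [mtok]
          simp only [if_neg hc]
          rw [tk_cons_ne c r ch hc]
          by_cases hws : PySem.Chars.isspace c
          · exact (ih r hr).1 _ (ch ++ [c]) false
              (by rw [strip_append_ws cur c hws]; exact hcur)
              (by rw [strip_append_ws ch c hws]; exact hch)
          · exact (ih r hr).2.2.1 _ (ch ++ [c]) (strip_nonws_ne cur c hws)
              (by rw [lstrip_ws_append cur c hcur hws, lstrip_ws_append ch c hch hws])
      -- (WP)
      · intro cur ch hcur hch
        by_cases hc : c = ' '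
        · subst hc
          rw [tk_space_space, fsTok_cons, mtok]
          simp only [if_pos rfl, hcur, ne_eq, not_true_eq_false, and_false, if_false,
            if_neg (by simp : ¬ (true = false))]
          rw [(ih r hr).1 _ [] true hcur rfl]
          simp [hch]
        · rw [tk_space_ne c r ch hc, tk_cons_ne c r _ hc, mtok]
          simp only [if_neg hc]
          by_cases hws : PySem.Chars.isspace c
          · exact (ih r hr).1 _ ((ch ++ [' ']) ++ [c]) false
              (by rw [strip_append_ws cur c hws]; exact hcur)
              (by rw [strip_append_ws _ c hws, strip_append_ws ch ' ' (by decide)]; exact hch)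
          · exact (ih r hr).2.2.1 _ ((ch ++ [' ']) ++ [c]) (strip_nonws_ne cur c hws)
              (by rw [lstrip_ws_append cur c hcur hws,
                      lstrip_ws_append (ch ++ [' ']) c
                        (by rw [strip_append_ws ch ' ' (by decide)]; exact hch) hws])
      -- (N)
      · intro cur ch hcur hls
        by_cases hc : c = ' '
        · subst hc
          rw [mtok]
          simp only [if_pos rfl, if_neg (by simp : ¬ (false = true ∧ PySem.Chars.strip cur ≠ [])),
            if_pos rfl]
          exact (ih r hr).2.2.2 cur ch hcur hls
        · rw [mtok]
          simp only [if_neg hc]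
          rw [tk_cons_ne c r ch hc]
          have hlcur : PySem.Chars.lstrip cur ≠ [] := lstrip_ne_nil_of_strip cur hcur
          have hlch : PySem.Chars.lstrip ch ≠ [] := by rw [← hls]; exact hlcur
          exact (ih r hr).2.2.1 _ (ch ++ [c]) (strip_append_ne cur c hcur)
            (by rw [lstrip_append cur [c] hlcur, lstrip_append ch [c] hlch, hls])
      -- (NP)
      · intro w ch hw hls
        have hws' : PySem.Chars.strip (w ++ [' ']) = PySem.Chars.strip w := strip_append_ws w ' ' (by decide)
        have hlw : PySem.Chars.lstrip w ≠ [] := lstrip_ne_nil_of_strip w hw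
        have hlch : PySem.Chars.lstrip ch ≠ [] := by rw [← hls]; exact hlw
        by_cases hc : c = ' '
        · subst hc
          rw [tk_space_space, fsTok_cons, mtok]
          simp only [if_pos rfl, if_pos (⟨rfl, by rw [hws']; exact hw⟩ :
            (true = true ∧ PySem.Chars.strip (w ++ [' ']) ≠ []))]
          rw [(ih r hr).1 [] [] true rfl rfl]
          have h3 := strip_eq_of_lstrip_eq w ch hls
          simp [← h3, hw, hws']
        · rw [tk_space_ne c r ch hc, tk_cons_ne c r _ hc, mtok]
          simp only [if_neg hc]
          have hlch' : PySem.Chars.lstrip (ch ++ [' ']) ≠ [] := by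
            rw [lstrip_append ch [' '] hlch]; simp
          exact (ih r hr).2.2.1 _ ((ch ++ [' ']) ++ [c]) (strip_append_ne (w ++ [' ']) c (by rw [hws']; exact hw))
            (by rw [lstrip_append (w ++ [' ']) [c] (by rw [lstrip_append w [' '] hlw]; simp),
                    lstrip_append (ch ++ [' ']) [c] hlch',
                    lstrip_append w [' '] hlw, lstrip_append ch [' '] hlch, hls])

-- fuelled splitOn equals tk

theorem go_tk : ∀ (fuel : Nat) (l cur : List Char) (acc : List (List Char)), l.length ≤ fuel →
    PySem.Chars.splitOn.go [' ', ' '] fuel l cur acc = acc.reverse ++ tk l cur.reverse := by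
  intro fuel
  induction fuel with
  | zero =>
    intro l cur acc h
    have : l = [] := by cases l <;> simp_all
    subst this
    simp [PySem.Chars.splitOn.go, tk]
  | succ n ih =>
    intro l cur acc h
    match l with
    | [] => simp [PySem.Chars.splitOn.go, tk]
    | [c] =>
      simp only [PySem.Chars.splitOn.go]
      have hpre : ([' ', ' ']).isPrefixOf [c] = false := by simp [List.isPrefixOf]
      simp only [hpre, Bool.false_eq_true, if_false]
      rw [ih [] (c :: cur) acc (by simp)]
      simp [tk]
    | c1 :: c2 :: r =>
      simp only [PySem.Chars.splitOn.go]
      by_cases hc : c1 = ' ' ∧ c2 = ' '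
      · obtain ⟨h1, h2⟩ := hc
        subst h1; subst h2
        have hpre : ([' ', ' ']).isPrefixOf (' ' :: ' ' :: r) = true := by simp [List.isPrefixOf]
        simp only [hpre, if_true, List.length_cons, List.drop_succ_cons, List.drop_zero,
          List.length_nil]
        rw [ih r [] (cur.reverse :: acc) (by simp at h ⊢; omega)]
        rw [show tk (' ' :: ' ' :: r) cur.reverse = cur.reverse :: tk r [] by rw [tk]; simp]
        simp
      · have hpre : ([' ', ' ']).isPrefixOf (c1 :: c2 :: r) = false := by
          rw [Bool.eq_false_iff]
          intro hp
          simp [List.isPrefixOf] at hp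
          exact hc ⟨hp.1.symm, hp.2.symm⟩
        simp only [hpre, Bool.false_eq_true, if_false]
        rw [ih (c2 :: r) (c1 :: cur) acc (by simp at h ⊢; omega)]
        rw [show tk (c1 :: c2 :: r) cur.reverse = tk (c2 :: r) (cur.reverse ++ [c1]) by
          rw [tk]; simp [hc]]
        simp

theorem splitOn_eq_tk (l : List Char) : PySem.Chars.splitOn l ("  ".toList) = tk l [] := by
  unfold PySem.Chars.splitOn
  rw [show ("  ".toList) = [' ', ' '] from rfl]
  rw [go_tk _ _ _ _ (by omega)]
  simp


-- == A's fold is mtok; B's splitOn comprehension is fsTok∘tk; they meet via main_sim ==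

theorem foldA_gen : ∀ (l : List Char) (hs : List (List Char)) (cur : List Char) (prev : Bool),
    (if PySem.Chars.strip (l.foldl stepA (hs, cur, prev)).2.1 ≠ [] then
       (l.foldl stepA (hs, cur, prev)).1 ++ [PySem.Chars.strip (l.foldl stepA (hs, cur, prev)).2.1]
     else (l.foldl stepA (hs, cur, prev)).1) = hs ++ mtok l cur prev := by
  intro l
  induction l with
  | nil =>
    intro hs cur prev
    rw [mtok]
    by_cases h : PySem.Chars.strip cur = [] <;> simp [h]
  | cons c r ih =>
    intro hs cur prev
    rw [List.foldl_cons, mtok]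
    by_cases hc : c = ' '
    · subst hc
      by_cases h1 : prev = true ∧ PySem.Chars.strip cur ≠ []
      · rw [show stepA (hs, cur, prev) ' ' = (hs ++ [PySem.Chars.strip cur], [], true) from by
          simp [stepA, h1]]
        rw [ih, if_pos rfl, if_pos h1]
        simp
      · by_cases h2 : prev = false
        · rw [show stepA (hs, cur, prev) ' ' = (hs, cur ++ [' '], true) from by
            simp [stepA, h1, h2]]
          rw [ih, if_pos rfl, if_neg h1, if_pos h2]
        · have hp : prev = true := by cases prev <;> simp_all
          have hsc : PySem.Chars.strip cur = [] := by
            by_contra hne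
            exact h1 ⟨hp, hne⟩
          rw [show stepA (hs, cur, prev) ' ' = (hs, cur, true) from by
            simp [stepA, h1, h2, hsc]]
          rw [ih, if_pos rfl, if_neg h1, if_neg h2]
    · rw [show stepA (hs, cur, prev) c = (hs, cur ++ [c], false) from by simp [stepA, hc]]
      rw [ih, if_neg hc]

theorem headersA_eq_mtok (l : List Char) : headersA l = mtok l [] false := by
  show (if PySem.Chars.strip (l.foldl stepA ([], [], false)).2.1 ≠ [] then
       (l.foldl stepA ([], [], false)).1 ++ [PySem.Chars.strip (l.foldl stepA ([], [], false)).2.1]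
     else (l.foldl stepA ([], [], false)).1) = mtok l [] false
  rw [foldA_gen]
  simp

theorem mtok_eq_fsTok_tk (l : List Char) : mtok l [] false = fsTok (tk l []) :=
  (main_sim l.length l le_rfl).1 [] [] false rfl rfl

theorem colsOf_eq_fsTok (l : List Char) : colsOf l = fsTok (tk l []) := by
  unfold colsOf fsTok
  rw [splitOn_eq_tk, List.filter_map]
  rfl

theorem headersA_eq_colsOf (l : List Char) : headersA l = colsOf l := by
  rw [headersA_eq_mtok, mtok_eq_fsTok_tk, colsOf_eq_fsTok]

theorem mtok_ws : ∀ (cs cur : List Char) (prev : Bool), (∀ c ∈ cs, PySem.Chars.isspace c) →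
    PySem.Chars.strip cur = [] → mtok cs cur prev = [] := by
  intro cs
  induction cs with
  | nil =>
    intro cur prev _ hcur
    rw [mtok]
    simp [hcur]
  | cons c r ih =>
    intro cur prev hws hcur
    have hcr : ∀ x ∈ r, PySem.Chars.isspace x := fun x hx => hws x (by simp [hx])
    have hcws : PySem.Chars.isspace c := hws c (by simp)
    rw [mtok]
    by_cases hc : c = ' '
    · simp only [if_pos hc, hcur, ne_eq, not_true_eq_false, and_false, if_false]
      by_cases h2 : prev = false
      · simp only [if_pos h2]
        exact ih _ true hcr (by rw [strip_append_ws cur ' ' (by decide)]; exact hcur)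
      · simp only [if_neg h2]
        exact ih _ true hcr hcur
    · simp only [if_neg hc]
      exact ih _ false hcr (by rw [strip_append_ws cur c hcws]; exact hcur)

theorem colsOf_ws (l : List Char) (h : PySem.Chars.strip l = []) : colsOf l = [] := by
  rw [colsOf_eq_fsTok, ← mtok_eq_fsTok_tk]
  exact mtok_ws l [] false ((strip_eq_nil_iff l).mp h) rfl

theorem findFirstB_eq : ∀ (ls : List (List Char)) (i : Nat),
    findFirstB ls i = (findHeaderA ls i).map (fun p => (p.2, p.1)) := by
  intro ls
  induction ls with
  | nil => intro i; rfl
  | cons l rest ih =>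
    intro i
    rw [findFirstB, findHeaderA]
    by_cases h : PySem.Chars.strip l ≠ [] <;> simp [h, ih]

theorem join_nil_flatten (parts : List (List Char)) : PySem.Chars.join [] parts = parts.flatten := by
  unfold PySem.Chars.join
  induction parts with
  | nil => rfl
  | cons x r ih =>
    cases r with
    | nil => simp [List.intercalate]
    | cons y r2 =>
      simp only [List.intercalate, List.intersperse] at ih ⊢
      simp at ih ⊢
      exact ih

theorem foldl_emit {α : Type} (g : List Char → α → List Char) (f : α → List Char)
    (h : ∀ acc x, g acc x = acc ++ f x) :
    ∀ (l : List α) (init : List Char), l.foldl g init = init ++ (l.map f).flatten := by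
  intro l
  induction l with
  | nil => intro init; simp
  | cons x r ih =>
    intro init
    rw [List.foldl_cons, h, ih]
    simp

theorem bodyChunks_eq (rowF : List (List Char) → List Char) :
    ∀ (ls : List (List Char)),
    (ls.map (fun line =>
        if PySem.Chars.strip line ≠ [] ∧ (colsOf line ≠ [] ∧ 3 ≤ (colsOf line).length)
        then rowF (colsOf line) else [])).flatten
      = (((ls.map colsOf).filter (fun parts => 3 ≤ parts.length)).map rowF).flatten := by
  intro ls
  induction ls with
  | nil => rfl
  | cons line rest ih =>
    by_cases hs : PySem.Chars.strip line = []
    · simp [hs, colsOf_ws line hs, ih]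
    · by_cases h3 : 3 ≤ (colsOf line).length
      · have hne : colsOf line ≠ [] := by
          intro h
          rw [h] at h3
          simp at h3
        simp [hs, h3, hne, ih]
      · simp [hs, h3, ih]

-- ===== VERDICT (by name: the statement is the Claim_ definition above) =====
theorem parse_wmic_useraccount_table_spec : Claim_equal_parse_wmic_useraccount_table := by
  intro lines _
  unfold Spec_parse_wmic_useraccount_table
  simp only [parse_wmic_useraccount_table, parse_wmic_useraccount_table_alt, findFirstB_eq]
  cases hfa : findHeaderA (List.map String.toList lines) 0 with
  | none => rfl
  | some p =>
    obtain ⟨hl, idx⟩ := p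
    simp only [Option.map_some]
    rw [headersA_eq_colsOf]
    have hcond : (colsOf hl = [] ∨ (colsOf hl).length < 3) ↔ ((colsOf hl).length < 3) := by
      constructor
      · rintro (h | h)
        · rw [h]; simp
        · exact h
      · exact Or.inr
    rw [if_congr hcond rfl rfl]
    rw [foldl_emit (fun acc h => acc ++ "<th>".toList ++ escHtml h ++ "</th>".toList)
          (fun h => "<th>".toList ++ escHtml h ++ "</th>".toList)
          (fun acc x => by simp)]
    rw [foldl_emit
          (fun acc line =>
            if PySem.Chars.strip line ≠ [] then
              let parts := colsOf line
              if parts ≠ [] ∧ 3 ≤ parts.length then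
                let acc := acc ++ "    <tr>".toList
                let acc := (PySem.List.slice parts none (some 10)).foldl
                  (fun a p => a ++ "<td>".toList ++ escHtml p ++ "</td>".toList) acc
                acc ++ "</tr>\n".toList
              else acc
            else acc)
          (fun line =>
            if PySem.Chars.strip line ≠ [] ∧ (colsOf line ≠ [] ∧ 3 ≤ (colsOf line).length)
            then "    <tr>".toList ++ ((PySem.List.slice (colsOf line) none (some 10)).map
              (fun p => "<td>".toList ++ escHtml p ++ "</td>".toList)).flatten ++ "</tr>\n".toList
            else [])
          (fun acc line => by
            by_cases hsl : PySem.Chars.strip line = []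
            · simp [hsl]
            · by_cases hc : colsOf line ≠ [] ∧ 3 ≤ (colsOf line).length
              · simp only [hsl, ne_eq, not_false_eq_true, true_and, if_pos hc]
                rw [foldl_emit (fun a p => a ++ "<td>".toList ++ escHtml p ++ "</td>".toList)
                      (fun p => "<td>".toList ++ escHtml p ++ "</td>".toList)
                      (fun a p => by simp)]
                simp
              · simp [hsl, hc])]
    rw [bodyChunks_eq (fun parts =>
          "    <tr>".toList ++ ((PySem.List.slice parts none (some 10)).map
            (fun p => "<td>".toList ++ escHtml p ++ "</td>".toList)).flatten ++ "</tr>\n".toList)]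
    simp only [join_nil_flatten]
    simp [List.append_assoc]
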